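-- pv_equiv track=rewrite | github.com/jkulhanek/lemmatag | data.py | collect_factors
-- ===== SOURCE A (Python) =====
-- def collect_factors(factor_words):
--     # We will collect all factors from the dataset
--     # Since it is not provided in Straka's dump
--     factors = []
--     for i in range(15):
--         unique = list(set([x[i] for x in factor_words if len(x) == 15]))
--         unique.sort()
--         unique = ['<pad>', '<unk>'] + unique
--         factors.append(unique)
--     return factors
-- ===== SOURCE B (Python) =====
-- def collect_factors(factor_words):
--     # One pass over the words filling all 15 per-position sets at once,
--     # instead of re-scanning the whole list once per position.
--     sets = [set() for _ in range(15)]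
--     for word in factor_words:
--         if len(word) == 15:
--             for s, f in zip(sets, word):
--                 s.add(f)
--     return [['<pad>', '<unk>'] + sorted(s) for s in sets]
-- ===== Notes on version B (the rewrite author's own statement) =====
-- stated objective: simpler
-- what changed: B makes a single pass over factor_words filling 15 per-position sets at once, instead of A's 15 re-scans (one list comprehension per position).
import Mathlib
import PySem

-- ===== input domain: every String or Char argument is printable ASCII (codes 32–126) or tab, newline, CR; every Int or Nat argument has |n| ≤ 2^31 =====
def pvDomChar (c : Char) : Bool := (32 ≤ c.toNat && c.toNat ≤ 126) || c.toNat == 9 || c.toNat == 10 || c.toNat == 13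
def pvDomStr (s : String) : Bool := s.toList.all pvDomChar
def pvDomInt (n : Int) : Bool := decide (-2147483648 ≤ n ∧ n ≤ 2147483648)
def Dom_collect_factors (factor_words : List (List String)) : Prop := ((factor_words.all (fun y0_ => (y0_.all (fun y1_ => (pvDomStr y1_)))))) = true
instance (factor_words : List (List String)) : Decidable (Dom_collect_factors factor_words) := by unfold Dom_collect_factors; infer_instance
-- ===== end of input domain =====

-- B replaces A's 15 re-scans of factor_words (one per factor position) by a single pass
-- filling 15 per-position sets at once; objective: simpler single-pass decomposition.

-- ===== PORT A =====
-- x[i] is ported as (pyGet? x i).getD "": exact here, since the comprehension keeps only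
-- words with len(x) == 15 and i ranges over 0..14, so the index is always in range.
def collect_factors (factor_words : List (List String)) : List (List String) :=
  (PySem.List.pyRange 0 15 1).foldl
    (fun factors i =>
      let unique : List String :=
        PySem.Set.ofList ((factor_words.filter (fun x => x.length == 15)).map
          (fun x => (PySem.List.pyGet? x i).getD ""))
      let unique := PySem.List.sorted unique (fun y => y) false
      let unique := "<pad>" :: "<unk>" :: unique
      factors ++ [unique])
    []

-- ===== PORT B =====
def collect_factors_alt (factor_words : List (List String)) : List (List String) :=
  let sets : List (PySem.Set String) :=
    factor_words.foldl
      (fun sets word =>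
        if word.length == 15 then List.zipWith PySem.Set.add sets word else sets)
      (List.replicate 15 PySem.Set.empty)
  sets.map (fun s => "<pad>" :: "<unk>" :: PySem.List.sorted s (fun y => y) false)

-- ===== PRECONDITION & SPEC =====
def Spec_collect_factors (factor_words : List (List String)) (out : List (List String)) : Prop := out = collect_factors_alt factor_words
instance (factor_words : List (List String)) (out : List (List String)) : Decidable (Spec_collect_factors factor_words out) := by unfold Spec_collect_factors; infer_instance

-- ===== CLAIM (what is proved, stated in full; the proofs are below) =====
def Claim_equal_collect_factors : Prop := ∀ (factor_words : List (List String)), Dom_collect_factors factor_words → Spec_collect_factors factor_words (collect_factors factor_words)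

-- ===== LEMMAS AND PROOFS =====

-- appending one element per loop iteration is a map
theorem pv_foldl_append_map {α β : Type} (f : α → β) :
    ∀ (l : List α) (acc : List β),
      l.foldl (fun a i => a ++ [f i]) acc = acc ++ l.map f := by
  intro l
  induction l with
  | nil => intro acc; simp
  | cons x xs ih => intro acc; simp [List.foldl_cons, ih]

def pvStep (sets : List (PySem.Set String)) (word : List String) : List (PySem.Set String) :=
  if word.length == 15 then List.zipWith PySem.Set.add sets word else sets

theorem pv_length_foldl_step (fw : List (List String)) :
    ∀ (sets : List (PySem.Set String)), sets.length = 15 →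
      (fw.foldl pvStep sets).length = 15 := by
  induction fw with
  | nil => intro sets h; simpa using h
  | cons w ws ih =>
    intro sets h
    simp only [List.foldl_cons]
    apply ih
    unfold pvStep
    split
    · next hw =>
        have hw' : w.length = 15 := by simpa using hw
        simp [List.length_zipWith, h, hw']
    · exact h

-- the i-th set after the fold is the fold of Set.add over the i-th column
theorem pv_getD_foldl_step (fw : List (List String)) :
    ∀ (sets : List (PySem.Set String)), sets.length = 15 → ∀ (i : Nat), i < 15 →
      (fw.foldl pvStep sets).getD i PySem.Set.empty
        = ((fw.filter (fun x => x.length == 15)).map (fun x => x.getD i "")).foldl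
            PySem.Set.add (sets.getD i PySem.Set.empty) := by
  induction fw with
  | nil => intro sets h15 i hi; simp
  | cons w ws ih =>
    intro sets h15 i hi
    simp only [List.foldl_cons, List.filter_cons]
    by_cases hw : w.length = 15
    · have hstep : pvStep sets w = List.zipWith PySem.Set.add sets w := by
        simp [pvStep, hw]
      have hlen : (pvStep sets w).length = 15 := by
        rw [hstep]; simp [List.length_zipWith, h15, hw]
      rw [ih (pvStep sets w) hlen i hi]
      have hget : (pvStep sets w).getD i PySem.Set.empty =
          PySem.Set.add (sets.getD i PySem.Set.empty) (w.getD i "") := by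
        rw [hstep]
        rw [List.getD_eq_getElem _ _ (by simp [List.length_zipWith, h15, hw]; omega)]
        rw [List.getElem_zipWith]
        rw [List.getD_eq_getElem sets _ (by omega), List.getD_eq_getElem w _ (by omega)]
      rw [hget]
      simp [hw]
    · have hstep : pvStep sets w = sets := by
        simp [pvStep, hw]
      rw [hstep, ih sets h15 i hi]
      simp [hw]

-- ===== VERDICT (by name: the statement is the Claim_ definition above) =====
theorem collect_factors_spec : Claim_equal_collect_factors := by
  intro fw _
  unfold Spec_collect_factors collect_factors collect_factors_alt
  rw [pv_foldl_append_map]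
  have hrange : PySem.List.pyRange 0 15 1 = (List.range 15).map (fun n => Int.ofNat n) := by
    decide
  rw [hrange, List.map_map, List.nil_append]
  have hflen : (fw.foldl pvStep (List.replicate 15 PySem.Set.empty)).length = 15 :=
    pv_length_foldl_step fw _ (by simp)
  show _ = (fw.foldl pvStep (List.replicate 15 PySem.Set.empty)).map _
  apply List.ext_getElem
  · simp only [List.length_map, List.length_range, hflen]
  · intro i h1 h2
    simp only [List.getElem_map, List.getElem_range, Function.comp]
    have hi : i < 15 := by simpa using h1
    have hcol :
        (fw.filter (fun x => x.length == 15)).map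
            (fun x => (PySem.List.pyGet? x (Int.ofNat i)).getD "")
          = (fw.filter (fun x => x.length == 15)).map (fun x => x.getD i "") := by
      apply List.map_congr_left
      intro x hx
      simp [Int.ofNat_eq_natCast, PySem.List.pyGet?_natCast, List.getD_eq_getElem?_getD]
    have hset := pv_getD_foldl_step fw (List.replicate 15 PySem.Set.empty) (by simp) i hi
    have hgd : (fw.foldl pvStep (List.replicate 15 PySem.Set.empty)).getD i PySem.Set.empty
        = (fw.foldl pvStep (List.replicate 15 PySem.Set.empty))[i]'(by omega) :=
      List.getD_eq_getElem _ _ (by omega)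
    have hrep : (List.replicate 15 (PySem.Set.empty : PySem.Set String)).getD i PySem.Set.empty
        = PySem.Set.empty := by
      rw [List.getD_eq_getElem _ _ (by simpa using hi), List.getElem_replicate]
    rw [hrep] at hset
    rw [hcol, ← hgd, hset, PySem.Set.ofList_eq_foldl]
    rfl
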